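-- pv_equiv track=rewrite | github.com/omkar7887/Chat-Bot | chatbot.py | simple_chatbot
-- ===== SOURCE A (Python) =====
-- def simple_chatbot(user_input):
--     # Convert user input to lowercase for case-insensitivity
--     user_input = user_input.lower()
--
--     # Define predefined rules and responses
--     greetings = ['hello', 'hi', 'hey']
--     farewells = ['bye', 'goodbye', 'see you']
--     questions = ['how are you', 'what is your name', 'who created you']
--
--     # Check user input against predefined rules
--     if any(greeting in user_input for greeting in greetings):
--         return "Hello! How can I help you today?"
--
--     elif any(farewell in user_input for farewell in farewells):
--         return "Goodbye! Have a great day."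
--
--     elif any(question in user_input for question in questions):
--         if 'how are you' in user_input:
--             return "I'm just a computer program, but I'm doing well. Thanks for asking!"
--         elif 'what is your name' in user_input:
--             return "Manu."
--         elif 'who created you' in user_input:
--             return "I was created by a programmer using Python."
--
--     else:
--         return "I'm sorry, I don't understand that. Can you please rephrase or ask another question?"
-- ===== SOURCE B (Python) =====
-- def simple_chatbot(user_input):
--     text = user_input.lower()
--     phrases = ['hello', 'hi', 'hey', 'bye', 'goodbye', 'see you',
--                'how are you', 'what is your name', 'who created you']
--     replies = ["Hello! How can I help you today?"] * 3 + \
--               ["Goodbye! Have a great day."] * 3 + \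
--               ["I'm just a computer program, but I'm doing well. Thanks for asking!",
--                "Manu.",
--                "I was created by a programmer using Python."]
--     hits = [i for i, phrase in enumerate(phrases) if phrase in text]
--     if hits:
--         return replies[min(hits)]
--     return "I'm sorry, I don't understand that. Can you please rephrase or ask another question?"
-- ===== Notes on version B (the rewrite author's own statement) =====
-- stated objective: alternative
-- what changed: Replaces A's nested if/elif group classifier (with early exit) by exhaustive scoring: B collects the indices of ALL matching phrases in one comprehension and selects the reply of the minimum (highest-priority) index, with a default when no phrase matches.
import Mathlib
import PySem

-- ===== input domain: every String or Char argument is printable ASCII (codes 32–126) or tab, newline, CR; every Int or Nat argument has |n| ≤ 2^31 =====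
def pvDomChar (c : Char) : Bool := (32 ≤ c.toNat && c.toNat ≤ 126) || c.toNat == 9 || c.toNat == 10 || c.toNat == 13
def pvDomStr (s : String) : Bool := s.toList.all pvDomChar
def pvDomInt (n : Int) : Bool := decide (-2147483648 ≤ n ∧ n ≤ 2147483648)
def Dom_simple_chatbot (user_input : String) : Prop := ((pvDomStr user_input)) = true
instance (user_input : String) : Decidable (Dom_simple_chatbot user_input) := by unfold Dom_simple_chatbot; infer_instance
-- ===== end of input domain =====

-- B replaces A's early-exit nested if/elif group classifier by exhaustive scoring:
-- collect the indices of ALL matching phrases and answer with the reply of the minimum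
-- (highest-priority) index (alternative decomposition, same cost).

-- ===== PORT A =====
def simple_chatbot (user_input : String) : String :=
  let ui := PySem.Str.lower user_input
  let greetings : List String := ["hello", "hi", "hey"]
  let farewells : List String := ["bye", "goodbye", "see you"]
  let questions : List String := ["how are you", "what is your name", "who created you"]
  if greetings.any (fun g => PySem.Str.isIn g ui) then
    "Hello! How can I help you today?"
  else if farewells.any (fun f => PySem.Str.isIn f ui) then
    "Goodbye! Have a great day."
  else if questions.any (fun q => PySem.Str.isIn q ui) then
    if PySem.Str.isIn "how are you" ui then
      "I'm just a computer program, but I'm doing well. Thanks for asking!"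
    else if PySem.Str.isIn "what is your name" ui then
      "Manu."
    else if PySem.Str.isIn "who created you" ui then
      "I was created by a programmer using Python."
    else
      -- unreachable: the guard 'questions.any' guarantees one of the three branches fires
      "I'm sorry, I don't understand that. Can you please rephrase or ask another question?"
  else
    "I'm sorry, I don't understand that. Can you please rephrase or ask another question?"

-- ===== PORT B =====
def simple_chatbot_alt (user_input : String) : String :=
  let text := PySem.Str.lower user_input
  let phrases : List String :=
    ["hello", "hi", "hey", "bye", "goodbye", "see you",
     "how are you", "what is your name", "who created you"]
  let replies : List String :=
    ["Hello! How can I help you today?", "Hello! How can I help you today?",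
     "Hello! How can I help you today?", "Goodbye! Have a great day.",
     "Goodbye! Have a great day.", "Goodbye! Have a great day.",
     "I'm just a computer program, but I'm doing well. Thanks for asking!",
     "Manu.", "I was created by a programmer using Python."]
  let hits : List Int :=
    ((PySem.List.enumerate phrases 0).filter (fun ip => PySem.Str.isIn ip.2 text)).map
      (fun ip => ip.1)
  match PySem.List.min? hits (fun i => i) with
  | some i =>
      -- replies[min(hits)]: the index is always in range (0 ≤ i ≤ 8), so getD is unreachable
      (PySem.List.pyGet? replies i).getD
        "I'm sorry, I don't understand that. Can you please rephrase or ask another question?"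
  | none =>
      "I'm sorry, I don't understand that. Can you please rephrase or ask another question?"

-- ===== PRECONDITION & SPEC =====
def Spec_simple_chatbot (user_input : String) (out : String) : Prop := out = simple_chatbot_alt user_input
instance (user_input : String) (out : String) : Decidable (Spec_simple_chatbot user_input out) := by unfold Spec_simple_chatbot; infer_instance

-- ===== CLAIM =====
def Claim_equal_simple_chatbot : Prop := ∀ (user_input : String), Dom_simple_chatbot user_input → Spec_simple_chatbot user_input (simple_chatbot user_input)

-- ===== LEMMAS AND PROOFS =====

-- ===== VERDICT =====
theorem simple_chatbot_spec : Claim_equal_simple_chatbot := by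
  intro ui _
  unfold Spec_simple_chatbot simple_chatbot simple_chatbot_alt
  simp only [PySem.List.enumerate_cons, PySem.List.enumerate_nil, List.filter_cons,
    List.filter_nil, List.any_cons, List.any_nil, Bool.or_false]
  generalize PySem.Str.isIn "hello" (PySem.Str.lower ui) = b1
  generalize PySem.Str.isIn "hi" (PySem.Str.lower ui) = b2
  generalize PySem.Str.isIn "hey" (PySem.Str.lower ui) = b3
  generalize PySem.Str.isIn "bye" (PySem.Str.lower ui) = b4
  generalize PySem.Str.isIn "goodbye" (PySem.Str.lower ui) = b5
  generalize PySem.Str.isIn "see you" (PySem.Str.lower ui) = b6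
  generalize PySem.Str.isIn "how are you" (PySem.Str.lower ui) = b7
  generalize PySem.Str.isIn "what is your name" (PySem.Str.lower ui) = b8
  generalize PySem.Str.isIn "who created you" (PySem.Str.lower ui) = b9
  cases b1 <;> cases b2 <;> cases b3 <;> cases b4 <;> cases b5 <;> cases b6 <;>
    cases b7 <;> cases b8 <;> cases b9 <;> rfl
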